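-- pv_equiv track=rewrite | github.com/DoanNgocCuong/BasicTasksLearning_MachineLearning | spMiniProj_pwStrengthClassifi_Hoa/test_1modelApp.py | extract_advanced_features
-- ===== SOURCE A (Python) =====
-- def extract_advanced_features(password):
--     features = {
--         'length': len(password),
--         'uppercase_count': sum(1 for c in password if c.isupper()),
--         'lowercase_count': sum(1 for c in password if c.islower()),
--         'digit_count': sum(1 for c in password if c.isdigit()),
--         'special_char_count': sum(1 for c in password if not c.isalnum()),
--         'consecutive_digits_count': sum(1 for i in range(1, len(password)) if password[i].isdigit() and password[i-1].isdigit()),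
--         'consecutive_letters_count': sum(1 for i in range(1, len(password)) if password[i].isalpha() and password[i-1].isalpha()),
--         'repeat_char_count': len(password) - len(set(password)),
--         'char_variety': sum(1 for count in [sum(1 for c in password if c.isupper()),
--                                             sum(1 for c in password if c.islower()),
--                                             sum(1 for c in password if c.isdigit()),
--                                             sum(1 for c in password if not c.isalnum())] if count > 0)
--     }
--     return features
-- ===== SOURCE B (Python) =====
-- def extract_advanced_features(password):
--     upper = lower = digit = special = 0
--     consec_d = consec_l = 0
--     prev = None
--     seen = set()
--     for c in password:
--         if c.isupper():
--             upper += 1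
--         if c.islower():
--             lower += 1
--         if c.isdigit():
--             digit += 1
--         if not c.isalnum():
--             special += 1
--         if prev is not None:
--             if c.isdigit() and prev.isdigit():
--                 consec_d += 1
--             if c.isalpha() and prev.isalpha():
--                 consec_l += 1
--         seen.add(c)
--         prev = c
--     variety = sum(1 for n in (upper, lower, digit, special) if n > 0)
--     return {
--         'length': len(password),
--         'uppercase_count': upper,
--         'lowercase_count': lower,
--         'digit_count': digit,
--         'special_char_count': special,
--         'consecutive_digits_count': consec_d,
--         'consecutive_letters_count': consec_l,
--         'repeat_char_count': len(password) - len(seen),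
--         'char_variety': variety,
--     }
-- ===== Notes on version B (the rewrite author's own statement) =====
-- stated objective: faster
-- what changed: Replaced A's eleven separate passes (nine comprehensions plus a set build, with the four category counts recomputed for char_variety) by one explicit loop carrying a previous-character variable, integer accumulators and a seen-set, deriving char_variety from the stored counts.
import Mathlib
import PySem

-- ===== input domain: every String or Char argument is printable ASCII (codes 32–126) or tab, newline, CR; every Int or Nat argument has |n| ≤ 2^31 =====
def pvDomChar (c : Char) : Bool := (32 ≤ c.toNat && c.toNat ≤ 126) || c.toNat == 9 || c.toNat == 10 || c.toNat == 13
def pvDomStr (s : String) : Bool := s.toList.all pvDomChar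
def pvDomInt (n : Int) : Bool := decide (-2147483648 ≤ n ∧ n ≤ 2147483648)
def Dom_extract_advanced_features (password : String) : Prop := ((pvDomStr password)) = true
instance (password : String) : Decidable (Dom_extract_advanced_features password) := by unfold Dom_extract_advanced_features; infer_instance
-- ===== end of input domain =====

-- B fuses A's eleven passes into one explicit loop with accumulators (objective: faster by a constant factor).

-- ===== PORT A =====
-- Literal port: each dict entry is its own pass over the string, exactly as in the Python.
def extract_advanced_features (password : String) : List (String × Int) :=
  let cs := password.toList
  [("length", PySem.Str.len password),
   ("uppercase_count", (cs.countP (fun c => PySem.Chars.isupper c) : Int)),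
   ("lowercase_count", (cs.countP (fun c => PySem.Chars.islower c) : Int)),
   ("digit_count", (cs.countP (fun c => PySem.Chars.isdigit c) : Int)),
   ("special_char_count", (cs.countP (fun c => ! PySem.Chars.isalnum c) : Int)),
   ("consecutive_digits_count",
     ((PySem.List.pyRange 1 (PySem.Str.len password) 1).countP
       (fun i => PySem.Chars.isdigit (PySem.List.pyGetD cs i ' ')
              && PySem.Chars.isdigit (PySem.List.pyGetD cs (i - 1) ' ')) : Int)),
   ("consecutive_letters_count",
     ((PySem.List.pyRange 1 (PySem.Str.len password) 1).countP
       (fun i => PySem.Chars.isalpha (PySem.List.pyGetD cs i ' ')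
              && PySem.Chars.isalpha (PySem.List.pyGetD cs (i - 1) ' ')) : Int)),
   ("repeat_char_count", PySem.Str.len password - PySem.Set.len (PySem.Set.ofList cs)),
   ("char_variety",
     (([((cs.countP (fun c => PySem.Chars.isupper c) : Nat) : Int),
        ((cs.countP (fun c => PySem.Chars.islower c) : Nat) : Int),
        ((cs.countP (fun c => PySem.Chars.isdigit c) : Nat) : Int),
        ((cs.countP (fun c => ! PySem.Chars.isalnum c) : Nat) : Int)].countP
       (fun count => decide (count > 0))) : Int))]

-- ===== PORT B =====
structure BState where
  prev : Option Char
  up : Int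
  low : Int
  dig : Int
  spec : Int
  cd : Int
  cl : Int
  seen : PySem.Set Char
deriving Repr

def stepB (st : BState) (c : Char) : BState :=
  let up := if PySem.Chars.isupper c then st.up + 1 else st.up
  let low := if PySem.Chars.islower c then st.low + 1 else st.low
  let dig := if PySem.Chars.isdigit c then st.dig + 1 else st.dig
  let spec := if ! PySem.Chars.isalnum c then st.spec + 1 else st.spec
  let cd := match st.prev with
    | some p => if PySem.Chars.isdigit c && PySem.Chars.isdigit p then st.cd + 1 else st.cd
    | none => st.cd
  let cl := match st.prev with
    | some p => if PySem.Chars.isalpha c && PySem.Chars.isalpha p then st.cl + 1 else st.cl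
    | none => st.cl
  ⟨some c, up, low, dig, spec, cd, cl, PySem.Set.add st.seen c⟩

def extract_advanced_features_alt (password : String) : List (String × Int) :=
  let st := password.toList.foldl stepB ⟨none, 0, 0, 0, 0, 0, 0, PySem.Set.empty⟩
  let variety : Int := ([st.up, st.low, st.dig, st.spec].countP (fun n => decide (n > 0)) : Int)
  [("length", PySem.Str.len password),
   ("uppercase_count", st.up),
   ("lowercase_count", st.low),
   ("digit_count", st.dig),
   ("special_char_count", st.spec),
   ("consecutive_digits_count", st.cd),
   ("consecutive_letters_count", st.cl),
   ("repeat_char_count", PySem.Str.len password - PySem.Set.len st.seen),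
   ("char_variety", variety)]

-- ===== PRECONDITION & SPEC =====
def Spec_extract_advanced_features (password : String) (out : List (String × Int)) : Prop := out = extract_advanced_features_alt password
instance (password : String) (out : List (String × Int)) : Decidable (Spec_extract_advanced_features password out) := by unfold Spec_extract_advanced_features; infer_instance

-- ===== CLAIM (what is proved, stated in full; the proofs are below) =====
def Claim_equal_extract_advanced_features : Prop := ∀ (password : String), Dom_extract_advanced_features password → Spec_extract_advanced_features password (extract_advanced_features password)

-- ===== LEMMAS AND PROOFS =====

-- chain count: number of adjacent pairs (prev, c) in (prev?, cs) both satisfying p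
def chainCount (p : Char → Bool) : Option Char → List Char → Int
  | _, [] => 0
  | prev, c :: cs =>
    (match prev with
     | some x => if p c && p x then (1 : Int) else 0
     | none => 0) + chainCount p (some c) cs

lemma foldB_spec (cs : List Char) (st : BState) :
    cs.foldl stepB st =
      ⟨(cs.getLast?).or st.prev,
       st.up + (cs.countP (fun c => PySem.Chars.isupper c) : Int),
       st.low + (cs.countP (fun c => PySem.Chars.islower c) : Int),
       st.dig + (cs.countP (fun c => PySem.Chars.isdigit c) : Int),
       st.spec + (cs.countP (fun c => ! PySem.Chars.isalnum c) : Int),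
       st.cd + chainCount PySem.Chars.isdigit st.prev cs,
       st.cl + chainCount PySem.Chars.isalpha st.prev cs,
       PySem.Set.update st.seen cs⟩ := by
  induction cs generalizing st with
  | nil => simp [chainCount, PySem.Set.update]
  | cons c cs ih =>
    rw [List.foldl_cons, ih]
    rcases st with ⟨prev, u, l, d, s, cd, cl, seen⟩
    cases prev <;>
      · simp only [stepB, BState.mk.injEq, List.countP_cons, chainCount, PySem.Set.update,
          List.foldl_cons]
        refine ⟨?_, ?_, ?_, ?_, ?_, ?_, ?_, ?_⟩
        · rcases h : cs.getLast? with _ | x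
          · rw [List.getLast?_eq_none_iff] at h; subst h; rfl
          · simp [List.getLast?_cons, h]
        all_goals first
          | trivial
          | (split_ifs <;> push_cast <;> ring)
          | (push_cast; ring)

-- A's index-based consecutive count over range(1, len) equals chainCount from no previous char
lemma rangeN_eq_chain (p : Char → Bool) (cs : List Char) :
    ((List.range (cs.length - 1)).countP
      (fun k => p (cs.getD (k + 1) ' ') && p (cs.getD k ' ')) : Int)
    = chainCount p none cs := by
  cases cs with
  | nil => simp [chainCount]
  | cons c cs =>
    simp only [chainCount, List.length_cons, Nat.add_sub_cancel, zero_add]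
    induction cs generalizing c with
    | nil => simp [chainCount]
    | cons c' cs' ih =>
      rw [show (c' :: cs').length = cs'.length + 1 from rfl, List.range_succ_eq_map]
      simp only [List.countP_cons, List.countP_map, chainCount]
      have := ih c'
      rw [show (List.countP ((fun k => p ((c :: c' :: cs').getD (k + 1) ' ') &&
            p ((c :: c' :: cs').getD k ' ')) ∘ Nat.succ) (List.range cs'.length)) =
          List.countP (fun k => p ((c' :: cs').getD (k + 1) ' ') && p ((c' :: cs').getD k ' '))
            (List.range cs'.length) from List.countP_congr (by intro k _; rfl)]
      rw [← this]
      simp only [List.getD_cons_succ, List.getD_cons_zero]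
      split_ifs <;> push_cast <;> ring

lemma pyCount_eq_chain (p : Char → Bool) (cs : List Char) :
    ((PySem.List.pyRange 1 (cs.length : Int) 1).countP
      (fun i => p (PySem.List.pyGetD cs i ' ') && p (PySem.List.pyGetD cs (i - 1) ' ')) : Int)
    = chainCount p none cs := by
  rw [PySem.List.pyRange_of_pos 1 (cs.length : Int) (by norm_num), List.countP_map,
    ← rangeN_eq_chain p cs]
  congr 1
  have hsize : (if (1 : Int) < (cs.length : Int) then
      (((cs.length : Int) - 1 + 1 - 1) / 1).toNat else 0) = cs.length - 1 := by
    split_ifs with h <;> omega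
  rw [hsize]
  apply List.countP_congr
  intro k hk
  have hk' : k + 1 < cs.length := by
    have := List.mem_range.mp hk; omega
  simp only [Function.comp]
  have h1 : (1 : Int) + 1 * (k : Int) = ((k + 1 : Nat) : Int) := by omega
  have h2 : (1 : Int) + 1 * (k : Int) - 1 = ((k : Nat) : Int) := by omega
  rw [h2, h1, PySem.List.pyGetD_natCast, PySem.List.pyGetD_natCast]
-- ===== VERDICT (by name: the statement is the Claim_ definition above) =====
theorem extract_advanced_features_spec : Claim_equal_extract_advanced_features := by
  intro password _
  unfold Spec_extract_advanced_features extract_advanced_features extract_advanced_features_alt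
  rw [foldB_spec]
  simp only [PySem.Str.len_eq, zero_add, PySem.Set.update_empty,
    ← pyCount_eq_chain PySem.Chars.isdigit password.toList,
    ← pyCount_eq_chain PySem.Chars.isalpha password.toList]
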